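-- pv_equiv track=rewrite | github.com/ccmbioinfo/FORCAST | src/primer-design/classes/APE.py | formatSequence
-- ===== SOURCE A (Python) =====
-- def formatSequence(seq):
--     """
--     Format the genomic sequence passed (seq) for the APE file so it has an indent,
--     base number, and 60 bases per line with a space separator every 10 bases and
--     two slashes '//' to mark the end of the sequence
--
--     *Adapted from Greg's Code*
--     """
--     # split sequence into 10bp chunks
--     splitSequence = [seq[i : (i + 10)] for i in range(0, len(seq), 10)]
--     count = 1
--     baseNum = 1
--     seqLine = ""
--     seqString = ""
--     for chunk in splitSequence:
--         # length of the indent needs to take into account the number at the beginning of the line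
--         indent = 9 - len(str(baseNum))
--         if count % 6 == 1:
--             # create the beginning of the line with first 10 bases
--             seqLine = " " * indent + str(baseNum) + " " + chunk
--         elif count % 6 != 0:  # we aren't at the last chunk of the line
--             seqLine += " " + chunk  # print a space and the next 10 bases
--         else:
--             # here we know the count is a multiple of 6 so it's the last chunk of the line
--             seqLine += " " + chunk + "\n"  # print the last 10 bases and a newline
--             seqString += seqLine  # add the line to the formatted string
--             baseNum += 60  # increment the base count by 60
--         count += 1
--     # if the previous chunk wasn't a multiple of 6 and wasn't added to the string
--     if (count - 1) % 6 != 0: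
--         seqString += seqLine
--     # add the EOF character
--     seqString += "\n//"
--
--     return seqString
-- ===== SOURCE B (Python) =====
-- def formatSequence(seq):
--     """Format seq into numbered 60bp lines (10bp chunks), ending with '\n//'.
--
--     Group-wise re-implementation: build the 10bp chunk list, then render one
--     whole line per group of six chunks; only a full 6-chunk line gets a
--     trailing newline (matching the original).
--     """
--     chunks = [seq[i : i + 10] for i in range(0, len(seq), 10)]
--     lines = []
--     for g in range(0, len(chunks), 6):
--         group = chunks[g : g + 6]
--         num = str(10 * g + 1)
--         line = " " * (9 - len(num)) + num + " " + " ".join(group)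
--         if len(group) == 6:
--             line += "\n"
--         lines.append(line)
--     return "".join(lines) + "\n//"
-- ===== Notes on version B (the rewrite author's own statement) =====
-- stated objective: simpler
-- what changed: Replaced A's single flat pass with a count-modulo-6 state machine (count/baseNum/seqLine/seqString threaded through every chunk) by an explicit line-wise loop over groups of six chunks that renders each numbered line in one step with a space-join.
import Mathlib
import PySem

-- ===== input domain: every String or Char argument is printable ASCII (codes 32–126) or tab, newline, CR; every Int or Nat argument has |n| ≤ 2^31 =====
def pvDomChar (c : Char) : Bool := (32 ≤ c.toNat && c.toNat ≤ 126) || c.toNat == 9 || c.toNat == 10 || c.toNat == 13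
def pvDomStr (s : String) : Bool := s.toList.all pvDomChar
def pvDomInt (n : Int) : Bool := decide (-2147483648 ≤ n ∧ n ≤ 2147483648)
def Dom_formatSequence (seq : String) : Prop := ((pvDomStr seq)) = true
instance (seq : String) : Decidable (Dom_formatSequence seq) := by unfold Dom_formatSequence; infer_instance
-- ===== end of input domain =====

-- B replaces A's flat count-%6 state machine by an explicit per-line loop over groups
-- of six 10bp chunks (objective: simpler decomposition; not claimed faster).

-- ===== PORT A =====
-- shared by both ports: both Pythons build the chunk list with the identical comprehension
-- [seq[i:i+10] for i in range(0, len(seq), 10)]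
def pvChunks (cs : List Char) : List (List Char) :=
  (PySem.List.pyRange 0 cs.length 10).map (fun i => PySem.Chars.slice cs (some i) (some (i + 10)))

-- one iteration of A's for-loop; state = (count, baseNum, seqLine, seqString)
-- " " * indent is ported by hand: List.replicate indent.toNat ' ' (exact: Python gives "" for indent ≤ 0)
def pvStepA (st : Int × Int × List Char × List Char) (chunk : List Char) :
    Int × Int × List Char × List Char :=
  let (count, baseNum, seqLine, seqString) := st
  let indent : Int := 9 - ((PySem.Int.toChars baseNum).length : Int)
  if PySem.Int.mod count 6 = 1 then
    (count + 1, baseNum, List.replicate indent.toNat ' ' ++ PySem.Int.toChars baseNum ++ ' ' :: chunk, seqString)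
  else if PySem.Int.mod count 6 ≠ 0 then
    (count + 1, baseNum, seqLine ++ ' ' :: chunk, seqString)
  else
    (count + 1, baseNum + 60, seqLine ++ ' ' :: chunk ++ ['\n'],
      seqString ++ (seqLine ++ ' ' :: chunk ++ ['\n']))

-- A's code after the loop: flush the pending line if it was not a full one, then add "\n//"
def pvFinishA (st : Int × Int × List Char × List Char) : List Char :=
  if PySem.Int.mod (st.1 - 1) 6 ≠ 0 then st.2.2.2 ++ st.2.2.1 else st.2.2.2

def formatSequence (seq : String) : String :=
  String.ofList (pvFinishA ((pvChunks seq.toList).foldl pvStepA (1, 1, [], [])) ++ '\n' :: '/' :: ['/'])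

-- ===== PORT B =====
-- one rendered line: group = chunks[g:g+6]; indent + str(10*g+1) + " " + " ".join(group),
-- with a trailing newline exactly when the group is full
def pvLineOf (chunks : List (List Char)) (g : Int) : List Char :=
  let group := PySem.List.slice chunks (some g) (some (g + 6))
  let num := PySem.Int.toChars (10 * g + 1)
  let line := List.replicate ((9 - (num.length : Int)).toNat) ' ' ++ num ++ ' ' :: PySem.Chars.join [' '] group
  if group.length = 6 then line ++ ['\n'] else line

-- B's for-loop over range(0, len(chunks), 6), appending each line; then "".join(lines) + "\n//"
def formatSequence_alt (seq : String) : String :=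
  String.ofList (PySem.Chars.join []
    ((PySem.List.pyRange 0 (pvChunks seq.toList).length 6).foldl
      (fun acc g => acc ++ [pvLineOf (pvChunks seq.toList) g]) [])
    ++ '\n' :: '/' :: ['/'])

-- ===== PRECONDITION & SPEC =====
def Spec_formatSequence (seq : String) (out : String) : Prop := out = formatSequence_alt seq
instance (seq : String) (out : String) : Decidable (Spec_formatSequence seq out) := by unfold Spec_formatSequence; infer_instance

-- ===== CLAIM (what is proved, stated in full; the proofs are below) =====
def Claim_equal_formatSequence : Prop := ∀ (seq : String), Dom_formatSequence seq → Spec_formatSequence seq (formatSequence seq)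

-- ===== LEMMAS AND PROOFS =====

-- proof-only helpers: B's lines as a structural recursion over the chunk list
def pvLineB (base : Int) (group : List (List Char)) : List Char :=
  let num := PySem.Int.toChars base
  List.replicate ((9 - (num.length : Int)).toNat) ' ' ++ num ++ ' ' :: PySem.Chars.join [' '] group

def pvLinesB : List (List Char) → Int → List (List Char)
  | [], _ => []
  | c :: rest, base =>
    let group := (c :: rest).take 6
    let line := pvLineB base group
    let line := if group.length = 6 then line ++ ['\n'] else line
    line :: pvLinesB (rest.drop 5) (base + 60)
termination_by chunks _ => chunks.length
decreasing_by simp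

lemma pvJoinNil (l : List (List Char)) : PySem.Chars.join [] l = l.flatten := by
  induction l with
  | nil => rfl
  | cons a t ih =>
    cases t with
    | nil => rfl
    | cons b t' =>
      show ([] : List Char).intercalate _ = _
      simp only [List.intercalate, List.intersperse, List.flatten] at ih ⊢
      simpa using ih

-- the loop invariant: starting a fresh line at group k, A's remaining run plus its
-- flush equals B's remaining rendered lines appended to the output so far
lemma pvKey : ∀ (n : Nat) (chunks : List (List Char)), chunks.length ≤ n →
    ∀ (k : Nat) (line0 s : List Char),
    pvFinishA (chunks.foldl pvStepA (6 * (k : Int) + 1, 60 * (k : Int) + 1, line0, s)) =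
      s ++ PySem.Chars.join [] (pvLinesB chunks (60 * (k : Int) + 1)) := by
  intro n
  induction n with
  | zero =>
    intro chunks h k line0 s
    have : chunks = [] := List.eq_nil_of_length_eq_zero (Nat.le_zero.mp h)
    subst this
    simp [pvLinesB, pvFinishA]
  | succ n ih =>
    intro chunks h k line0 s
    rcases chunks with _|⟨c1,_|⟨c2,_|⟨c3,_|⟨c4,_|⟨c5,_|⟨c6,rest⟩⟩⟩⟩⟩⟩
    · simp [pvLinesB, pvFinishA]
    · simp [pvStepA, pvFinishA, pvLinesB, pvLineB, PySem.Chars.join_singleton]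
    ·
      have hm2 : ¬ ((6 * (k:Int) + 1 + 1) % 6 = 1) := by omega
      have hd2 : ¬ ((6:Int) ∣ (6 * (k:Int) + 1 + 1)) := by omega
      simp [pvStepA, pvFinishA, pvLinesB, pvLineB, PySem.Chars.join_cons_cons, PySem.Chars.join_singleton, hm2, hd2]
    ·
      have hm2 : ¬ ((6 * (k:Int) + 1 + 1) % 6 = 1) := by omega
      have hd2 : ¬ ((6:Int) ∣ (6 * (k:Int) + 1 + 1)) := by omega
      have hm3 : ¬ ((6 * (k:Int) + 1 + 1 + 1) % 6 = 1) := by omega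
      have hd3 : ¬ ((6:Int) ∣ (6 * (k:Int) + 1 + 1 + 1)) := by omega
      simp [pvStepA, pvFinishA, pvLinesB, pvLineB, PySem.Chars.join_cons_cons, PySem.Chars.join_singleton, hm2, hd2, hm3, hd3]
    ·
      have hm2 : ¬ ((6 * (k:Int) + 1 + 1) % 6 = 1) := by omega
      have hd2 : ¬ ((6:Int) ∣ (6 * (k:Int) + 1 + 1)) := by omega
      have hm3 : ¬ ((6 * (k:Int) + 1 + 1 + 1) % 6 = 1) := by omega
      have hd3 : ¬ ((6:Int) ∣ (6 * (k:Int) + 1 + 1 + 1)) := by omega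
      have hm4 : ¬ ((6 * (k:Int) + 1 + 1 + 1 + 1) % 6 = 1) := by omega
      have hd4 : ¬ ((6:Int) ∣ (6 * (k:Int) + 1 + 1 + 1 + 1)) := by omega
      simp [pvStepA, pvFinishA, pvLinesB, pvLineB, PySem.Chars.join_cons_cons, PySem.Chars.join_singleton, hm2, hd2, hm3, hd3, hm4, hd4]
    ·
      have hm2 : ¬ ((6 * (k:Int) + 1 + 1) % 6 = 1) := by omega
      have hd2 : ¬ ((6:Int) ∣ (6 * (k:Int) + 1 + 1)) := by omega
      have hm3 : ¬ ((6 * (k:Int) + 1 + 1 + 1) % 6 = 1) := by omega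
      have hd3 : ¬ ((6:Int) ∣ (6 * (k:Int) + 1 + 1 + 1)) := by omega
      have hm4 : ¬ ((6 * (k:Int) + 1 + 1 + 1 + 1) % 6 = 1) := by omega
      have hd4 : ¬ ((6:Int) ∣ (6 * (k:Int) + 1 + 1 + 1 + 1)) := by omega
      have hm5 : ¬ ((6 * (k:Int) + 1 + 1 + 1 + 1 + 1) % 6 = 1) := by omega
      have hd5 : ¬ ((6:Int) ∣ (6 * (k:Int) + 1 + 1 + 1 + 1 + 1)) := by omega
      simp [pvStepA, pvFinishA, pvLinesB, pvLineB, PySem.Chars.join_cons_cons, PySem.Chars.join_singleton, hm2, hd2, hm3, hd3, hm4, hd4, hm5, hd5]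
    · -- a full line of six chunks, then recurse on the rest
      have hlen : rest.length ≤ n := by simp at h; omega
      have H : ∀ (line0' s' : List Char),
          pvFinishA (List.foldl pvStepA
            (6 * (k:Int) + 1 + 1 + 1 + 1 + 1 + 1 + 1, 60 * (k:Int) + 1 + 60, line0', s') rest) =
          s' ++ PySem.Chars.join [] (pvLinesB rest (60 * (k:Int) + 1 + 60)) := by
        intro line0' s'
        have Hrec := ih rest hlen (k + 1) line0' s'
        push_cast at Hrec
        rw [show (6 * ((k:Int) + 1) + 1) = 6 * (k:Int) + 1 + 1 + 1 + 1 + 1 + 1 + 1 from by ring,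
            show (60 * ((k:Int) + 1) + 1) = 60 * (k:Int) + 1 + 60 from by ring] at Hrec
        exact Hrec
      have hm2 : ¬ ((6 * (k:Int) + 1 + 1) % 6 = 1) := by omega
      have hd2 : ¬ ((6:Int) ∣ (6 * (k:Int) + 1 + 1)) := by omega
      have hm3 : ¬ ((6 * (k:Int) + 1 + 1 + 1) % 6 = 1) := by omega
      have hd3 : ¬ ((6:Int) ∣ (6 * (k:Int) + 1 + 1 + 1)) := by omega
      have hm4 : ¬ ((6 * (k:Int) + 1 + 1 + 1 + 1) % 6 = 1) := by omega
      have hd4 : ¬ ((6:Int) ∣ (6 * (k:Int) + 1 + 1 + 1 + 1)) := by omega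
      have hm5 : ¬ ((6 * (k:Int) + 1 + 1 + 1 + 1 + 1) % 6 = 1) := by omega
      have hd5 : ¬ ((6:Int) ∣ (6 * (k:Int) + 1 + 1 + 1 + 1 + 1)) := by omega
      have hm6 : ¬ ((6 * (k:Int) + 1 + 1 + 1 + 1 + 1 + 1) % 6 = 1) := by omega
      have hd6 : (6:Int) ∣ (6 * (k:Int) + 1 + 1 + 1 + 1 + 1 + 1) := by omega
      simp only [List.foldl_cons]
      simp [pvStepA, pvLinesB, pvLineB, pvJoinNil, PySem.Chars.join_cons_cons, PySem.Chars.join_singleton, hm2, hd2, hm3, hd3, hm4, hd4, hm5, hd5, hm6, hd6] at H ⊢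
      rw [H]
      simp


lemma pvRangeStep (a b : Int) (h : a < b) :
    PySem.List.pyRange a b 6 = a :: PySem.List.pyRange (a + 6) b 6 := by
  rw [PySem.List.pyRange_of_pos a b (by norm_num), PySem.List.pyRange_of_pos (a + 6) b (by norm_num)]
  have hn : ((b - a + 6 - 1) / 6).toNat = (if a + 6 < b then ((b - (a + 6) + 6 - 1) / 6).toNat else 0) + 1 := by
    split_ifs with h2 <;> omega
  rw [if_pos h, hn, List.range_succ_eq_map]
  simp only [List.map_cons, List.map_map]
  congr 1
  · simp
  · apply List.map_congr_left
    intro k _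
    show a + 6 * ((k + 1 : Nat) : Int) = a + 6 + 6 * (k : Int)
    push_cast
    ring

-- past the end of the chunk list both sides are empty
lemma pvBridgeNil (chunks : List (List Char)) (i : Nat) (hle : chunks.length ≤ 6 * i) :
    (PySem.List.pyRange (6 * (i : Int)) (chunks.length : Int) 6).map (pvLineOf chunks)
      = pvLinesB (chunks.drop (6 * i)) (60 * (i : Int) + 1) := by
  rw [PySem.List.pyRange_of_pos _ _ (by norm_num), if_neg (by omega)]
  simp [List.drop_eq_nil_of_le hle, pvLinesB]

-- B's range-indexed lines from group i onwards are the structural lines of the dropped list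
lemma pvBridge (chunks : List (List Char)) : ∀ (d i : Nat), chunks.length - 6 * i ≤ d →
    (PySem.List.pyRange (6 * (i : Int)) (chunks.length : Int) 6).map (pvLineOf chunks)
      = pvLinesB (chunks.drop (6 * i)) (60 * (i : Int) + 1) := by
  intro d
  induction d with
  | zero => intro i h; exact pvBridgeNil chunks i (by omega)
  | succ d ihd =>
    intro i h
    by_cases hlt : chunks.length ≤ 6 * i
    · exact pvBridgeNil chunks i hlt
    · rw [Nat.not_le] at hlt
      rw [pvRangeStep _ _ (by omega)]
      obtain ⟨c, rest, hd⟩ := List.exists_cons_of_ne_nil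
        (show chunks.drop (6 * i) ≠ [] from by
          have hlen2 : 0 < (chunks.drop (6 * i)).length := by simpa using hlt
          exact List.length_pos_iff.mp hlen2)
      rw [hd]
      simp only [List.map_cons]
      rw [show (6 * (i : Int) + 6) = 6 * ((i + 1 : Nat) : Int) from by omega]
      rw [ihd (i + 1) (by omega)]
      have hdrop : chunks.drop (6 * (i + 1)) = rest.drop 5 := by
        have : chunks.drop (6 * (i + 1)) = (chunks.drop (6 * i)).drop 6 := by
          rw [List.drop_drop]; congr 1
        rw [this, hd]
        rfl
      have hgroup : PySem.List.slice chunks (some (6 * (i : Int))) (some (6 * (i : Int) + 6))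
          = (c :: rest).take 6 := by
        rw [show (6 * (i : Int)) = ((6 * i : Nat) : Int) from by push_cast; ring,
            show (((6 * i : Nat) : Int) + 6) = ((6 * i + 6 : Nat) : Int) from by push_cast; ring,
            PySem.List.slice_natCast, hd]
        congr 1
        omega
      rw [hdrop]
      simp only [pvLinesB, pvLineOf, pvLineB, hgroup]
      rw [show (10 * (6 * (i : Int)) + 1) = 60 * (i : Int) + 1 from by ring,
          show (60 * ((i : Nat) + (1 : Nat) : Nat) : Int) + 1 = 60 * (i : Int) + 1 + 60 from by omega]

-- ===== VERDICT (by name: the statement is the Claim_ definition above) =====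
theorem formatSequence_spec : Claim_equal_formatSequence := by
  intro seq _
  unfold Spec_formatSequence formatSequence formatSequence_alt
  rw [PySem.List.foldl_append_singleton_eq_map]
  have hb := pvBridge (pvChunks seq.toList) (pvChunks seq.toList).length 0 (by omega)
  have ha := pvKey (pvChunks seq.toList).length (pvChunks seq.toList) le_rfl 0 [] []
  norm_num at hb ha
  rw [ha, List.nil_append, hb]
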